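-- pv_equiv track=rewrite | github.com/limsang/healthcare_dashboard | web_demo/utils/utils.py | dbspl_norm
-- ===== SOURCE A (Python) =====
-- def dbspl_norm(data):
--     lst = [0, 30, 45, 60, 80, 90, 100, 9999999]
--     color = ['mute', 'silence', 'whitenoise', 'cafenoise', 'stadium', 'rocking', 'kinda danger', 'warfare']
--
--     res = "mute"
--     for idx, item in enumerate(lst[:-1]):
--         if lst[idx] < data <= lst[idx + 1]:
--             res = color[idx + 1]
--
--     return res
-- ===== SOURCE B (Python) =====
-- def dbspl_norm(data):
--     bounds = [0, 30, 45, 60, 80, 90, 100, 9999999]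
--     labels = ['mute', 'silence', 'whitenoise', 'cafenoise', 'stadium', 'rocking', 'kinda danger', 'warfare']
--     # binary search (bisect_left): leftmost i with bounds[i] >= data
--     lo, hi = 0, len(bounds)
--     while lo < hi:
--         mid = (lo + hi) // 2
--         if bounds[mid] < data:
--             lo = mid + 1
--         else:
--             hi = mid
--     return labels[lo] if lo < len(labels) else 'mute'
-- ===== Notes on version B (the rewrite author's own statement) =====
-- stated objective: alternative
-- what changed: Replaced A's linear enumerate-and-overwrite scan over interval pairs with a hand-written bisect_left binary search over the threshold list followed by a single label lookup.
import Mathlib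
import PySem

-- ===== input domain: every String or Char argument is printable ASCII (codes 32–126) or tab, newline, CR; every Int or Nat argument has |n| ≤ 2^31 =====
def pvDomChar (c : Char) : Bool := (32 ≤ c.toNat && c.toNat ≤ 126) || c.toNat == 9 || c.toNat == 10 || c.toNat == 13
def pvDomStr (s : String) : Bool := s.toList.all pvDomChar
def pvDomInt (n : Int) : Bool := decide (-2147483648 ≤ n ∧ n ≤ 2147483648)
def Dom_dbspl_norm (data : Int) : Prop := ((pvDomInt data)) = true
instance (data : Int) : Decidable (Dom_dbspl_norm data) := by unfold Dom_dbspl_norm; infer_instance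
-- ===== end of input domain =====

-- B replaces A's linear enumerate-and-overwrite scan over interval pairs with a bisect_left
-- binary search on the threshold list plus one label lookup (objective: alternative).

-- ===== PORT A =====
-- A: enumerate over lst[:-1], overwrite res whenever lst[idx] < data <= lst[idx + 1].
def dbspl_norm (data : Int) : String :=
  let lst : List Int := [0, 30, 45, 60, 80, 90, 100, 9999999]
  let color : List String := ["mute", "silence", "whitenoise", "cafenoise", "stadium", "rocking", "kinda danger", "warfare"]
  (PySem.List.enumerate (PySem.List.slice lst none (some (-1)))).foldl
    (fun res (p : Int × Int) =>
      if PySem.List.pyGetD lst p.1 0 < data ∧ data ≤ PySem.List.pyGetD lst (p.1 + 1) 0 then PySem.List.pyGetD color (p.1 + 1) "" else res)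
    "mute"


-- ===== PORT B =====
-- B's while-loop: bisect_left binary search, leftmost index with bounds[mid] >= data.
-- lo/hi stay Int like Python's ints; (lo+hi)//2 is PySem.Int.floordiv (exact Python //);
-- termination is by the shrinking gap hi - lo.
def pvBisectGo (bounds : List Int) (data : Int) : Nat → Int → Int → Int
  | 0, lo, _ => lo
  | f + 1, lo, hi =>
    if lo < hi then
      let mid := PySem.Int.floordiv (lo + hi) 2
      if PySem.List.pyGetD bounds mid 0 < data then pvBisectGo bounds data f (mid + 1) hi
      else pvBisectGo bounds data f (lo) mid
    else lo

-- the while-loop runs with fuel (hi - lo).toNat: the gap hi - lo shrinks by at least 1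
-- every iteration, so the fuel is never exhausted and the guard lo < hi alone decides exit
def pvBisectLoop (bounds : List Int) (data lo hi : Int) : Int :=
  pvBisectGo bounds data (hi - lo).toNat lo hi

def dbspl_norm_alt (data : Int) : String :=
  let bounds : List Int := [0, 30, 45, 60, 80, 90, 100, 9999999]
  let labels : List String := ["mute", "silence", "whitenoise", "cafenoise", "stadium", "rocking", "kinda danger", "warfare"]
  let lo := pvBisectLoop bounds data 0 (bounds.length : Int)
  if lo < (labels.length : Int) then PySem.List.pyGetD labels lo "" else "mute"


-- ===== PRECONDITION & SPEC =====
def Spec_dbspl_norm (data : Int) (out : String) : Prop := out = dbspl_norm_alt data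
instance (data : Int) (out : String) : Decidable (Spec_dbspl_norm data out) := by unfold Spec_dbspl_norm; infer_instance

-- ===== CLAIM (what is proved, stated in full; the proofs are below) =====
def Claim_equal_dbspl_norm : Prop := ∀ (data : Int), Dom_dbspl_norm data → Spec_dbspl_norm data (dbspl_norm data)

-- ===== LEMMAS AND PROOFS =====
-- one unfolding step of the loop body, and bottom-up evaluation on the fixed threshold list
theorem pv_bl_self (b : List Int) (d : Int) (f : Nat) (lo : Int) : pvBisectGo b d f lo lo = lo := by
  cases f <;> simp [pvBisectGo]

theorem pv_step (b : List Int) (d : Int) (f : Nat) (lo hi : Int) (h : lo < hi) :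
    pvBisectGo b d (f + 1) lo hi =
      if PySem.List.pyGetD b (PySem.Int.floordiv (lo + hi) 2) 0 < d then
        pvBisectGo b d f (PySem.Int.floordiv (lo + hi) 2 + 1) hi
      else pvBisectGo b d f lo (PySem.Int.floordiv (lo + hi) 2) := by
  simp [pvBisectGo, h]

theorem pv_bl78 (d : Int) (g : Nat) (hg : 0 < g) : pvBisectGo [0, 30, 45, 60, 80, 90, 100, 9999999] d g 7 8 =
    if 9999999 < d then 8 else 7 := by
  obtain ⟨f, rfl⟩ : ∃ f, g = f + 1 := ⟨g - 1, by omega⟩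
  rw [pv_step _ _ _ _ _ (by norm_num)]
  norm_num [PySem.Int.floordiv, PySem.List.pyGetD, PySem.List.pyGet?, PySem.List.pyIdx?,
    List.getElem_cons_succ, List.getElem_cons_zero,
    (show Int.fdiv 15 2 = 7 by decide), (show Int.toNat 7 = 7 by decide), pv_bl_self]

theorem pv_bl56 (d : Int) (g : Nat) (hg : 0 < g) : pvBisectGo [0, 30, 45, 60, 80, 90, 100, 9999999] d g 5 6 =
    if 90 < d then 6 else 5 := by
  obtain ⟨f, rfl⟩ : ∃ f, g = f + 1 := ⟨g - 1, by omega⟩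
  rw [pv_step _ _ _ _ _ (by norm_num)]
  norm_num [PySem.Int.floordiv, PySem.List.pyGetD, PySem.List.pyGet?, PySem.List.pyIdx?,
    List.getElem_cons_succ, List.getElem_cons_zero,
    (show Int.fdiv 11 2 = 5 by decide), (show Int.toNat 5 = 5 by decide), pv_bl_self]

theorem pv_bl58 (d : Int) (g : Nat) (hg : 1 < g) : pvBisectGo [0, 30, 45, 60, 80, 90, 100, 9999999] d g 5 8 =
    if 100 < d then (if 9999999 < d then 8 else 7) else (if 90 < d then 6 else 5) := by
  obtain ⟨f, rfl⟩ : ∃ f, g = f + 1 := ⟨g - 1, by omega⟩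
  rw [pv_step _ _ _ _ _ (by norm_num)]
  norm_num [PySem.Int.floordiv, PySem.List.pyGetD, PySem.List.pyGet?, PySem.List.pyIdx?,
    List.getElem_cons_succ, List.getElem_cons_zero,
    (show Int.fdiv 13 2 = 6 by decide), (show Int.toNat 6 = 6 by decide), pv_bl78 d f (by omega), pv_bl56 d f (by omega)]

theorem pv_bl34 (d : Int) (g : Nat) (hg : 0 < g) : pvBisectGo [0, 30, 45, 60, 80, 90, 100, 9999999] d g 3 4 =
    if 60 < d then 4 else 3 := by
  obtain ⟨f, rfl⟩ : ∃ f, g = f + 1 := ⟨g - 1, by omega⟩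
  rw [pv_step _ _ _ _ _ (by norm_num)]
  norm_num [PySem.Int.floordiv, PySem.List.pyGetD, PySem.List.pyGet?, PySem.List.pyIdx?,
    List.getElem_cons_succ, List.getElem_cons_zero,
    (show Int.fdiv 7 2 = 3 by decide), (show Int.toNat 3 = 3 by decide), pv_bl_self]

theorem pv_bl01 (d : Int) (g : Nat) (hg : 0 < g) : pvBisectGo [0, 30, 45, 60, 80, 90, 100, 9999999] d g 0 1 =
    if 0 < d then 1 else 0 := by
  obtain ⟨f, rfl⟩ : ∃ f, g = f + 1 := ⟨g - 1, by omega⟩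
  rw [pv_step _ _ _ _ _ (by norm_num)]
  norm_num [PySem.Int.floordiv, PySem.List.pyGetD, PySem.List.pyGet?, PySem.List.pyIdx?,
    List.getElem_cons_succ, List.getElem_cons_zero,
    (show Int.fdiv 1 2 = 0 by decide), (show Int.toNat 0 = 0 by decide), pv_bl_self]

theorem pv_bl02 (d : Int) (g : Nat) (hg : 1 < g) : pvBisectGo [0, 30, 45, 60, 80, 90, 100, 9999999] d g 0 2 =
    if 30 < d then 2 else (if 0 < d then 1 else 0) := by
  obtain ⟨f, rfl⟩ : ∃ f, g = f + 1 := ⟨g - 1, by omega⟩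
  rw [pv_step _ _ _ _ _ (by norm_num)]
  norm_num [PySem.Int.floordiv, PySem.List.pyGetD, PySem.List.pyGet?, PySem.List.pyIdx?,
    List.getElem_cons_succ, List.getElem_cons_zero,
    (show Int.fdiv 2 2 = 1 by decide), (show Int.toNat 1 = 1 by decide), pv_bl01 d f (by omega), pv_bl_self]

theorem pv_bl04 (d : Int) (g : Nat) (hg : 2 < g) : pvBisectGo [0, 30, 45, 60, 80, 90, 100, 9999999] d g 0 4 =
    if 45 < d then (if 60 < d then 4 else 3) else (if 30 < d then 2 else (if 0 < d then 1 else 0)) := by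
  obtain ⟨f, rfl⟩ : ∃ f, g = f + 1 := ⟨g - 1, by omega⟩
  rw [pv_step _ _ _ _ _ (by norm_num)]
  norm_num [PySem.Int.floordiv, PySem.List.pyGetD, PySem.List.pyGet?, PySem.List.pyIdx?,
    List.getElem_cons_succ, List.getElem_cons_zero,
    (show Int.fdiv 4 2 = 2 by decide), (show Int.toNat 2 = 2 by decide), pv_bl34 d f (by omega), pv_bl02 d f (by omega)]

theorem pv_bl08 (d : Int) (g : Nat) (hg : 3 < g) : pvBisectGo [0, 30, 45, 60, 80, 90, 100, 9999999] d g 0 8 =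
    if 80 < d then
      (if 100 < d then (if 9999999 < d then 8 else 7) else (if 90 < d then 6 else 5))
    else
      (if 45 < d then (if 60 < d then 4 else 3) else (if 30 < d then 2 else (if 0 < d then 1 else 0))) := by
  obtain ⟨f, rfl⟩ : ∃ f, g = f + 1 := ⟨g - 1, by omega⟩
  rw [pv_step _ _ _ _ _ (by norm_num)]
  norm_num [PySem.Int.floordiv, PySem.List.pyGetD, PySem.List.pyGet?, PySem.List.pyIdx?,
    List.getElem_cons_succ, List.getElem_cons_zero,
    (show Int.fdiv 8 2 = 4 by decide), (show Int.toNat 4 = 4 by decide), pv_bl58 d f (by omega), pv_bl04 d f (by omega)]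

-- ===== VERDICT (by name: the statement is the Claim_ definition above) =====
set_option maxHeartbeats 2000000 in
theorem dbspl_norm_spec : Claim_equal_dbspl_norm := by
  intro data _
  show dbspl_norm data = dbspl_norm_alt data

  simp only [dbspl_norm, dbspl_norm_alt, PySem.List.slice_to_neg_one, List.dropLast,
    PySem.List.enumerate_cons, PySem.List.enumerate_nil, List.foldl_cons, List.foldl_nil,
    List.length_cons, List.length_nil]
  simp only [
    (show PySem.List.pyGetD [(0:Int), 30, 45, 60, 80, 90, 100, 9999999] 0 0 = 0 from rfl),
    (show PySem.List.pyGetD [(0:Int), 30, 45, 60, 80, 90, 100, 9999999] (0+1) 0 = 30 from rfl),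
    (show PySem.List.pyGetD [(0:Int), 30, 45, 60, 80, 90, 100, 9999999] (0+1+1) 0 = 45 from rfl),
    (show PySem.List.pyGetD [(0:Int), 30, 45, 60, 80, 90, 100, 9999999] (0+1+1+1) 0 = 60 from rfl),
    (show PySem.List.pyGetD [(0:Int), 30, 45, 60, 80, 90, 100, 9999999] (0+1+1+1+1) 0 = 80 from rfl),
    (show PySem.List.pyGetD [(0:Int), 30, 45, 60, 80, 90, 100, 9999999] (0+1+1+1+1+1) 0 = 90 from rfl),
    (show PySem.List.pyGetD [(0:Int), 30, 45, 60, 80, 90, 100, 9999999] (0+1+1+1+1+1+1) 0 = 100 from rfl),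
    (show PySem.List.pyGetD [(0:Int), 30, 45, 60, 80, 90, 100, 9999999] (0+1+1+1+1+1+1+1) 0 = 9999999 from rfl),
    (show ((((((((0+1)+1)+1)+1)+1)+1)+1)+1 : Nat) = 8 from rfl)]
  rw [(show ((8 : Nat) : Int) = 8 from rfl)]
  rw [pvBisectLoop, (show (((8:Int) - 0).toNat) = 8 from rfl), pv_bl08 data 8 (by omega)]
  split_ifs <;> first | rfl | omega
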